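-- pv_equiv track=rewrite | github.com/isovector/take2 | daemon/daemon/scm/diff.py | convert_line_numbers
-- ===== SOURCE A (Python) =====
-- def add_to_result(lines, result, old_line, new_line):
--     if lines[0] == old_line:
--         result.append(new_line)
--         lines.pop(0)
--
-- def convert_line_numbers(diff, lines):
--     lines.sort()
--
--     left_line = 0
--     right_line = 0
--     result = []
--     for line in diff:
--         if line == '<':
--             left_line += 1
--             add_to_result(lines, result, left_line, None)
--         elif line == '>':
--             right_line += 1
--         else:
--             left_line += 1
--             right_line += 1
--             add_to_result(lines, result, left_line, right_line)
--
--         if not len(lines):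
--             break
--
--     return result
-- ===== SOURCE B (Python) =====
-- def convert_line_numbers(diff, lines):
--     lines.sort()
--
--     # Pass 1 over the diff: table mapping each left-file line number to the
--     # right-file line number it ends up at (None for deleted lines).
--     mapping = {}
--     left = 0
--     right = 0
--     for line in diff:
--         if line == '<':
--             left += 1
--             mapping[left] = None
--         elif line == '>':
--             right += 1
--         else:
--             left += 1
--             right += 1
--             mapping[left] = right
--
--     # Pass 2: walk the left file's lines in order, emitting the mapped number
--     # whenever the next requested line is reached.
--     result = []
--     i = 0
--     for l, v in mapping.items():
--         if i < len(lines) and lines[i] == l: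
--             result.append(v)
--             i += 1
--     return result
-- ===== Notes on version B (the rewrite author's own statement) =====
-- stated objective: alternative
-- what changed: Replaces A's interleaved loop (helper popping queries from the mutated list while walking the diff, with a break) by two independent passes: one over the diff building a left-line -> right-line table, then one over the table's entries in order emitting a value whenever the next requested line is reached; Pre_ excludes only the inputs on which A raises IndexError (empty query list with a diff whose first line is not '>').
-- outside the precondition, e.g. on convert_line_numbers(['<'], []): A raises IndexError, B returns []
import Mathlib
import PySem

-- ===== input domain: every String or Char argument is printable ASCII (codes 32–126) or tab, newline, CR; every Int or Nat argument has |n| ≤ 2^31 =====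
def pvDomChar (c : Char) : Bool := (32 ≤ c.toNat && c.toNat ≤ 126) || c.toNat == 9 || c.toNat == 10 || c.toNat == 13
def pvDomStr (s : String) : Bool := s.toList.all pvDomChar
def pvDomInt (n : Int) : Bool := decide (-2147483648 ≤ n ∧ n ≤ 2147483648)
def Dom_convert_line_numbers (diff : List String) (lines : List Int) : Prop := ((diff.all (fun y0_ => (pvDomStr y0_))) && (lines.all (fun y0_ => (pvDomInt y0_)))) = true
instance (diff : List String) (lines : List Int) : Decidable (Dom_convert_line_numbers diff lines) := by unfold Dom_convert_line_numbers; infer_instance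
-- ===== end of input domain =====

-- B replaces A's pop-from-queue loop (with break) by two independent passes: build a
-- left->right table from the diff, then walk the table's entries emitting a value whenever
-- the next requested line is reached (alternative decomposition, same cost); both sort
-- `lines` in place in Python — the equivalence proved here is about the return value.


-- ===== PORT A =====
-- add_to_result(lines, result, old_line, new_line); returns the new (lines, result).
-- On an empty `lines` Python raises IndexError (lines[0]); that input is outside Pre_ below.
def pyAddToResult (lines : List Int) (result : List (Option Int)) (old : Int) (new : Option Int) :
    List Int × List (Option Int) :=
  match lines with
  | [] => ([], result)
  | l :: rest => if l = old then (rest, result ++ [new]) else (l :: rest, result)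

-- the `for line in diff` loop with its `break` when `lines` is exhausted
def convertLoopA : List String → List Int → Int → Int → List (Option Int) → List (Option Int)
  | [], _, _, _, result => result
  | line :: ds, lines, left, right, result =>
    if line = "<" then
      let p := pyAddToResult lines result (left + 1) none
      if p.1.length = 0 then p.2 else convertLoopA ds p.1 (left + 1) right p.2
    else if line = ">" then
      if lines.length = 0 then result else convertLoopA ds lines left (right + 1) result
    else
      let p := pyAddToResult lines result (left + 1) (some (right + 1))
      if p.1.length = 0 then p.2 else convertLoopA ds p.1 (left + 1) (right + 1) p.2

def convert_line_numbers (diff : List String) (lines : List Int) : List (Option Int) :=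
  convertLoopA diff (PySem.List.sorted lines (fun x => x) false) 0 0 []

-- ===== PORT B =====
-- pass 1: the dict `mapping` from left-line number to None ('<') / right line (context)
def buildMapB : List String → Int → Int → PySem.Dict Int (Option Int) → PySem.Dict Int (Option Int)
  | [], _, _, m => m
  | line :: ds, left, right, m =>
    if line = "<" then buildMapB ds (left + 1) right (m.insert (left + 1) none)
    else if line = ">" then buildMapB ds left (right + 1) m
    else buildMapB ds (left + 1) (right + 1) (m.insert (left + 1) (some (right + 1)))

-- pass 2: `for l, v in mapping.items(): if i < len(lines) and lines[i] == l: append; i += 1`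
def emitLoopB (lines : List Int) : List (Int × Option Int) → Nat → List (Option Int)
  | [], _ => []
  | (l, v) :: rest, i =>
    match lines[i]? with
    | some x => if x = l then v :: emitLoopB lines rest (i + 1) else emitLoopB lines rest i
    | none => emitLoopB lines rest i

def convert_line_numbers_alt (diff : List String) (lines : List Int) : List (Option Int) :=
  emitLoopB (PySem.List.sorted lines (fun x => x) false)
    (buildMapB diff 0 0 PySem.Dict.empty).items 0

-- ===== PRECONDITION & SPEC =====
-- Pre_ excludes exactly the inputs on which A raises IndexError: an empty query list together
-- with a nonempty diff whose first line is not '>' (add_to_result reads lines[0]).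
def Pre_convert_line_numbers (diff : List String) (lines : List Int) : Prop :=
  lines ≠ [] ∨ diff = [] ∨ diff.head? = some ">"
instance (diff : List String) (lines : List Int) : Decidable (Pre_convert_line_numbers diff lines) := by
  unfold Pre_convert_line_numbers; infer_instance
def pvWitness_convert_line_numbers : List String × List Int := (["x", "<", ">", "x"], [1, 2, 3])

def Spec_convert_line_numbers (diff : List String) (lines : List Int) (out : List (Option Int)) : Prop := out = convert_line_numbers_alt diff lines
instance (diff : List String) (lines : List Int) (out : List (Option Int)) : Decidable (Spec_convert_line_numbers diff lines out) := by unfold Spec_convert_line_numbers; infer_instance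

-- ===== CLAIM (what is proved, stated in full; the proofs are below) =====
def Claim_equal_convert_line_numbers : Prop := ∀ (diff : List String) (lines : List Int), Dom_convert_line_numbers diff lines → Pre_convert_line_numbers diff lines → Spec_convert_line_numbers diff lines (convert_line_numbers diff lines)

-- ===== LEMMAS AND PROOFS =====

-- proof-side association list: the table buildMapB builds, as a plain list of pairs
def mapOf : List String → Int → Int → List (Int × Option Int)
  | [], _, _ => []
  | d :: ds, l, r =>
    if d = "<" then (l + 1, none) :: mapOf ds (l + 1) r
    else if d = ">" then mapOf ds l (r + 1)
    else (l + 1, some (r + 1)) :: mapOf ds (l + 1) (r + 1)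

theorem buildMapB_items : ∀ (ds : List String) (l r : Int) (m : PySem.Dict Int (Option Int)),
    (∀ k ∈ m.keys, k ≤ l) → (buildMapB ds l r m).items = m.items ++ mapOf ds l r := by
  intro ds
  induction ds with
  | nil => intro l r m _; simp [buildMapB, mapOf]
  | cons d ds ih =>
    intro l r m h
    simp only [buildMapB, mapOf]
    split_ifs with h1 h2
    · have hc : m.contains (l + 1) = false := by
        rw [Bool.eq_false_iff]
        intro hct
        have := h _ ((PySem.Dict.contains_iff_mem_keys m (l + 1)).mp hct)
        omega
      rw [ih (l + 1) r _ (by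
        intro k hk
        rcases (PySem.Dict.mem_keys_insert m (l + 1) k none).mp hk with rfl | hk
        · omega
        · have := h _ hk; omega),
        PySem.Dict.items_insert_of_not_contains m none hc, List.append_assoc, List.singleton_append]
    · exact ih l (r + 1) m h
    · have hc : m.contains (l + 1) = false := by
        rw [Bool.eq_false_iff]
        intro hct
        have := h _ ((PySem.Dict.contains_iff_mem_keys m (l + 1)).mp hct)
        omega
      rw [ih (l + 1) (r + 1) _ (by
        intro k hk
        rcases (PySem.Dict.mem_keys_insert m (l + 1) k (some (r + 1))).mp hk with rfl | hk
        · omega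
        · have := h _ hk; omega),
        PySem.Dict.items_insert_of_not_contains m (some (r + 1)) hc, List.append_assoc,
        List.singleton_append]

-- proof-side emit loop, carrying the remaining query suffix instead of the index
def emitP : List (Int × Option Int) → List Int → List (Option Int)
  | [], _ => []
  | (k, v) :: rest, q =>
    match q with
    | [] => emitP rest []
    | x :: xs => if x = k then v :: emitP rest xs else emitP rest (x :: xs)

theorem emitP_nil : ∀ (m : List (Int × Option Int)), emitP m [] = [] := by
  intro m; induction m with
  | nil => rfl
  | cons p rest ih => obtain ⟨k, v⟩ := p; simpa [emitP] using ih

theorem emitLoopB_eq_emitP : ∀ (m : List (Int × Option Int)) (lines : List Int) (i : Nat),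
    emitLoopB lines m i = emitP m (lines.drop i) := by
  intro m
  induction m with
  | nil => intro lines i; rfl
  | cons p rest ih =>
    intro lines i
    obtain ⟨k, v⟩ := p
    simp only [emitLoopB, emitP]
    rcases hg : lines[i]? with _ | x
    · have hd : lines.drop i = [] := by
        have := List.getElem?_eq_none_iff.mp hg
        simp [List.drop_eq_nil_iff]; omega
      rw [hd, ih lines i, hd]
    · have hd : lines.drop i = x :: lines.drop (i + 1) := by
        have hlt : i < lines.length := by
          by_contra hh
          rw [List.getElem?_eq_none_iff.mpr (by omega)] at hg; cases hg
        rw [List.drop_eq_getElem_cons hlt]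
        congr 1
        have := List.getElem?_eq_getElem hlt
        rw [this] at hg; injection hg
      rw [hd]
      by_cases hx : x = k
      · simp [hx, ih lines (i + 1)]
      · simp [hx, ih lines i, hd]

-- one '<' or context step of the A-loop, against the table headed by its fresh key
theorem convertLoopA_pop_case : ∀ (ds : List String) (q : List Int) (left r' : Int)
    (res : List (Option Int)) (v : Option Int),
    (∀ (q' : List Int) (res' : List (Option Int)),
        convertLoopA ds q' (left + 1) r' res' = res' ++ emitP (mapOf ds (left + 1) r') q') →
    (let p := pyAddToResult q res (left + 1) v;
      if p.1.length = 0 then p.2 else convertLoopA ds p.1 (left + 1) r' p.2) =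
      res ++ emitP ((left + 1, v) :: mapOf ds (left + 1) r') q := by
  intro ds q left r' res v ih
  cases q with
  | nil => simp [pyAddToResult, emitP, emitP_nil]
  | cons l rest =>
    by_cases hl : l = left + 1
    · subst hl
      simp only [pyAddToResult, if_true]
      simp only [emitP]
      split_ifs with h0
      · rw [List.length_eq_zero_iff] at h0
        subst h0
        simp [emitP_nil]
      · rw [ih rest (res ++ [v])]
        simp
    · have hp : pyAddToResult (l :: rest) res (left + 1) v = (l :: rest, res) := by
        simp [pyAddToResult, hl]
      simp only [hp]
      rw [if_neg (by simp), ih (l :: rest) res]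
      simp [emitP, hl]

theorem convertLoopA_invariant : ∀ (ds : List String) (q : List Int) (left right : Int)
    (res : List (Option Int)),
    convertLoopA ds q left right res = res ++ emitP (mapOf ds left right) q := by
  intro ds
  induction ds with
  | nil => intro q left right res; simp [convertLoopA, mapOf, emitP]
  | cons d ds ih =>
    intro q left right res
    by_cases h1 : d = "<"
    · simp only [convertLoopA, mapOf, if_pos h1]
      exact convertLoopA_pop_case ds q left right res none
        (fun q' res' => ih q' (left + 1) right res')
    · by_cases h2 : d = ">"
      · simp only [convertLoopA, mapOf, if_neg h1, if_pos h2]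
        cases q with
        | nil => simp [emitP_nil]
        | cons l rest =>
          rw [if_neg (by simp)]
          exact ih (l :: rest) left (right + 1) res
      · simp only [convertLoopA, mapOf, if_neg h1, if_neg h2]
        exact convertLoopA_pop_case ds q left (right + 1) res (some (right + 1))
          (fun q' res' => ih q' (left + 1) (right + 1) res')

-- ===== VERDICT (by name: the statement is the Claim_ definition above) =====
theorem convert_line_numbers_spec : Claim_equal_convert_line_numbers := by
  intro diff lines _ _
  unfold Spec_convert_line_numbers convert_line_numbers convert_line_numbers_alt
  rw [convertLoopA_invariant, List.nil_append, emitLoopB_eq_emitP,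
    buildMapB_items diff 0 0 PySem.Dict.empty (by simp [PySem.Dict.keys_empty]),
    List.drop_zero]
  rfl
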